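-- pv_equiv track=rewrite | github.com/Erne1357/itcj | itcj2/core/utils/role_home.py | role_home
-- ===== SOURCE A (Python) =====
-- def role_home(roles) -> str:
--     """
--     Determina la ruta home basada en el rol de mayor prioridad del usuario.
--
--     Args:
--         roles: Puede ser un string (rol único) o un set/list de strings (múltiples roles)
--
--     Returns:
--         str: URL de la página home correspondiente al rol de mayor prioridad
--     """
--     ROLE_PRIORITY = [
--         "admin",
--         "staff",
--         "coordinator",
--         "social_service",
--         "student",
--     ]
--
--     ROLE_ROUTES = {
--         "admin": "/itcj/dashboard",
--         "staff": "/itcj/dashboard",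
--         "coordinator": "/itcj/dashboard",
--         "social_service": "/itcj/dashboard",
--         "student": "/itcj/m/",
--     }
--
--     if isinstance(roles, str):
--         user_roles = {roles}
--     else:
--         user_roles = set(roles)
--
--     if not user_roles:
--         return "/"
--
--     for role in ROLE_PRIORITY:
--         if role in user_roles:
--             return ROLE_ROUTES.get(role, "/")
--
--     if user_roles == {"student"}:
--         return "/itcj/m/"
--
--     return "/itcj/dashboard"
-- ===== SOURCE B (Python) =====
-- def role_home(roles) -> str:
--     """Pick home route by highest-priority role via a priority table (simpler: no scan of the priority list)."""
--     if isinstance(roles, str):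
--         user_roles = {roles}
--     else:
--         user_roles = set(roles)
--     if not user_roles:
--         return "/"
--     PRIO = {"admin": 0, "staff": 1, "coordinator": 2, "social_service": 3, "student": 4}
--     best = min(PRIO.get(r, 5) for r in user_roles)
--     return "/itcj/m/" if best == 4 else "/itcj/dashboard"
-- ===== Notes on version B (the rewrite author's own statement) =====
-- stated objective: simpler
-- what changed: Replaces the scan of the fixed priority list (plus the unreachable post-loop set-equality check) with a priority-index table and a single min over the user's roles, branching once on whether the best priority is 'student'.
import Mathlib
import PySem

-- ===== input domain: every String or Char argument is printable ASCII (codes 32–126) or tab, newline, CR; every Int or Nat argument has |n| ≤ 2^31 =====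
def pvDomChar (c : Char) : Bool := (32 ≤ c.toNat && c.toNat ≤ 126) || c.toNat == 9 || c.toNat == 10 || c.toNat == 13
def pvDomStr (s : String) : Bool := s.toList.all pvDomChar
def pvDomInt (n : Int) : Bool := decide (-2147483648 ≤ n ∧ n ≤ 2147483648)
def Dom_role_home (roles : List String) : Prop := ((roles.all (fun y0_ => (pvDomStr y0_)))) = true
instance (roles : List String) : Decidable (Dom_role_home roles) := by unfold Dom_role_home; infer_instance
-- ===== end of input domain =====

-- B replaces A's scan of the fixed priority list with a priority table and a single min over the user's
-- roles (objective: simpler); the return value is proved equal for every list of strings.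

-- ===== PORT A =====
def rhPriority : List String := ["admin", "staff", "coordinator", "social_service", "student"]

def rhRoutes : PySem.Dict String String :=
  PySem.Dict.ofList [("admin", "/itcj/dashboard"), ("staff", "/itcj/dashboard"),
    ("coordinator", "/itcj/dashboard"), ("social_service", "/itcj/dashboard"),
    ("student", "/itcj/m/")]

-- the 'for role in ROLE_PRIORITY: if role in user_roles: return …' loop (some = early return)
def rhScan (user : PySem.Set String) : List String → Option String
  | [] => none
  | r :: rs =>
    if PySem.Set.contains user r then some (PySem.Dict.getD rhRoutes r "/")
    else rhScan user rs

def role_home (roles : List String) : String :=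
  let user_roles := PySem.Set.ofList roles
  if PySem.Set.len user_roles = 0 then "/"
  else
    match rhScan user_roles rhPriority with
    | some route => route
    | none =>
      if PySem.Set.equal user_roles ["student"] then "/itcj/m/"
      else "/itcj/dashboard"

-- ===== PORT B =====
def rhPrio : PySem.Dict String Int :=
  PySem.Dict.ofList [("admin", 0), ("staff", 1), ("coordinator", 2), ("social_service", 3), ("student", 4)]

def role_home_alt (roles : List String) : String :=
  let user_roles := PySem.Set.ofList roles
  match user_roles with
  | [] => "/"
  | x :: xs =>
    -- min(PRIO.get(r, 5) for r in user_roles): min over the nonempty iterable as a fold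
    let best := xs.foldl (fun m r => min m (PySem.Dict.getD rhPrio r 5)) (PySem.Dict.getD rhPrio x 5)
    if best = 4 then "/itcj/m/" else "/itcj/dashboard"

-- ===== PRECONDITION & SPEC =====
def Spec_role_home (roles : List String) (out : String) : Prop := out = role_home_alt roles
instance (roles : List String) (out : String) : Decidable (Spec_role_home roles out) := by unfold Spec_role_home; infer_instance

-- ===== CLAIM (what is proved, stated in full; the proofs are below) =====
def Claim_equal_role_home : Prop := ∀ (roles : List String), Dom_role_home roles → Spec_role_home roles (role_home roles)

-- ===== LEMMAS AND PROOFS =====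

-- priority value of a role, closed form
set_option maxRecDepth 8192 in
lemma rhPrio_getD (r : String) :
    PySem.Dict.getD rhPrio r 5 =
      if r = "admin" then 0 else if r = "staff" then 1 else if r = "coordinator" then 2
      else if r = "social_service" then 3 else if r = "student" then 4 else 5 := by
  have h : rhPrio = PySem.Dict.mk [("admin", 0), ("staff", 1), ("coordinator", 2), ("social_service", 3), ("student", 4)] := by decide
  rw [h, PySem.Dict.getD]
  repeat rw [PySem.Dict.get?_mk_cons]
  by_cases h1 : r = "admin"
  · subst h1; decide
  by_cases h2 : r = "staff"
  · subst h2; decide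
  by_cases h3 : r = "coordinator"
  · subst h3; decide
  by_cases h4 : r = "social_service"
  · subst h4; decide
  by_cases h5 : r = "student"
  · subst h5; decide
  simp [beq_iff_eq, Ne.symm h1, Ne.symm h2, Ne.symm h3, Ne.symm h4, Ne.symm h5, h1, h2, h3, h4, h5, PySem.Dict.get?]

-- A's loop over the literal priority list, as nested membership tests
set_option maxRecDepth 8192 in
lemma rhScan_spec (S : PySem.Set String) :
    rhScan S rhPriority =
      if "admin" ∈ S then some "/itcj/dashboard"
      else if "staff" ∈ S then some "/itcj/dashboard"
      else if "coordinator" ∈ S then some "/itcj/dashboard"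
      else if "social_service" ∈ S then some "/itcj/dashboard"
      else if "student" ∈ S then some "/itcj/m/"
      else none := by
  have hr1 : PySem.Dict.getD rhRoutes "admin" "/" = "/itcj/dashboard" := by decide
  have hr2 : PySem.Dict.getD rhRoutes "staff" "/" = "/itcj/dashboard" := by decide
  have hr3 : PySem.Dict.getD rhRoutes "coordinator" "/" = "/itcj/dashboard" := by decide
  have hr4 : PySem.Dict.getD rhRoutes "social_service" "/" = "/itcj/dashboard" := by decide
  have hr5 : PySem.Dict.getD rhRoutes "student" "/" = "/itcj/m/" := by decide
  simp only [rhPriority, rhScan, hr1, hr2, hr3, hr4, hr5]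
  by_cases h1 : "admin" ∈ S <;> by_cases h2 : "staff" ∈ S <;> by_cases h3 : "coordinator" ∈ S <;>
    by_cases h4 : "social_service" ∈ S <;> by_cases h5 : "student" ∈ S <;>
    simp [h1, h2, h3, h4, h5]

-- the fold computes the minimum: the value is attained …
lemma foldl_min_attained (l : List Int) (a : Int) :
    l.foldl min a = a ∨ l.foldl min a ∈ l := by
  induction l generalizing a with
  | nil => exact Or.inl rfl
  | cons y ys ih =>
    rcases ih (min a y) with h | h
    · rcases le_total a y with hle | hle
      · exact Or.inl (by simpa [min_eq_left hle] using h)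
      · refine Or.inr ?_
        have hm : min a y = y := min_eq_right hle
        rw [hm] at h
        simp [List.foldl, hm, h]
    · exact Or.inr (List.mem_cons_of_mem _ h)

-- … and is a lower bound
lemma foldl_min_le (l : List Int) (a : Int) :
    l.foldl min a ≤ a ∧ ∀ x ∈ l, l.foldl min a ≤ x := by
  induction l generalizing a with
  | nil => simp
  | cons y ys ih =>
    obtain ⟨h1, h2⟩ := ih (min a y)
    refine ⟨le_trans h1 (min_le_left _ _), ?_⟩
    intro x hx
    rcases List.mem_cons.mp hx with rfl | hx
    · exact le_trans h1 (min_le_right _ _)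
    · exact h2 x hx

-- B's min: characterisation of best = 4 over the set's elements
lemma best_eq_four_iff (x : String) (xs : List String) :
    (xs.foldl (fun m r => min m (PySem.Dict.getD rhPrio r 5)) (PySem.Dict.getD rhPrio x 5) = 4) ↔
      ("student" ∈ x :: xs ∧ "admin" ∉ x :: xs ∧ "staff" ∉ x :: xs ∧
       "coordinator" ∉ x :: xs ∧ "social_service" ∉ x :: xs) := by
  rw [show xs.foldl (fun m r => min m (PySem.Dict.getD rhPrio r 5)) (PySem.Dict.getD rhPrio x 5)
      = (xs.map (fun r => PySem.Dict.getD rhPrio r 5)).foldl min (PySem.Dict.getD rhPrio x 5) from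
    List.foldl_map.symm]
  have hle := foldl_min_le (xs.map (fun r => PySem.Dict.getD rhPrio r 5)) (PySem.Dict.getD rhPrio x 5)
  have hat := foldl_min_attained (xs.map (fun r => PySem.Dict.getD rhPrio r 5)) (PySem.Dict.getD rhPrio x 5)
  generalize hb : (xs.map (fun r => PySem.Dict.getD rhPrio r 5)).foldl min (PySem.Dict.getD rhPrio x 5) = b at hle hat ⊢
  have hmemle : ∀ r ∈ x :: xs, b ≤ PySem.Dict.getD rhPrio r 5 := by
    intro r hr
    rcases List.mem_cons.mp hr with rfl | hr
    · exact hle.1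
    · simpa using hle.2 _ (List.mem_map_of_mem hr)
  have hex : ∃ r ∈ x :: xs, b = PySem.Dict.getD rhPrio r 5 := by
    rcases hat with h | h
    · exact ⟨x, List.mem_cons_self, h⟩
    · rcases List.mem_map.mp h with ⟨r, hr, hr2⟩
      exact ⟨r, List.mem_cons_of_mem _ hr, hr2.symm⟩
  constructor
  · intro h4
    obtain ⟨r, hr, hrb⟩ := hex
    have hpr : PySem.Dict.getD rhPrio r 5 = 4 := by rw [← hrb, h4]
    have hrstudent : r = "student" := by
      rw [rhPrio_getD] at hpr
      split_ifs at hpr with a1 a2 a3 a4 a5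
      · omega
      · omega
      · omega
      · omega
      · exact a5
      · omega
    refine ⟨hrstudent ▸ hr, ?_, ?_, ?_, ?_⟩ <;>
    · intro hmem
      have := hmemle _ hmem
      rw [rhPrio_getD] at this
      simp at this
      omega
  · rintro ⟨hstu, hna, hns, hnc, hno⟩
    have hub : b ≤ 4 := by
      have := hmemle _ hstu
      rw [rhPrio_getD] at this
      simpa using this
    have hlb : 4 ≤ b := by
      obtain ⟨r, hr, hrb⟩ := hex
      rw [hrb, rhPrio_getD]
      split_ifs with a1 a2 a3 a4 a5 <;>
        first
        | (exfalso; subst_vars; first | exact hna hr | exact hns hr | exact hnc hr | exact hno hr)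
        | omega
    omega

-- ===== VERDICT (by name: the statement is the Claim_ definition above) =====
theorem role_home_spec : Claim_equal_role_home := by
  intro roles _
  unfold Spec_role_home role_home role_home_alt
  set S := PySem.Set.ofList roles with hS
  cases hSc : S with
  | nil => simp [PySem.Set.len]
  | cons x xs =>
    have hlen : ¬ PySem.Set.len (x :: xs) = 0 := by simp [PySem.Set.len]; omega
    simp only [hlen, rhScan_spec, best_eq_four_iff]
    by_cases h1 : "admin" ∈ x :: xs <;> by_cases h2 : "staff" ∈ x :: xs <;>
      by_cases h3 : "coordinator" ∈ x :: xs <;> by_cases h4 : "social_service" ∈ x :: xs <;>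
      by_cases h5 : "student" ∈ x :: xs <;>
      simp [h1, h2, h3, h4, h5]
    -- remaining: the none branch, where "student" ∉ S, so S ≠ {"student"}
    all_goals
      have hne : PySem.Set.equal (x :: xs) ["student"] = false := by
        rw [Bool.eq_false_iff]
        intro hEq
        have := (PySem.Set.equal_iff _ _).mp hEq "student"
        exact h5 (this.mpr (by simp))
    exact ⟨"student", fun hiff => h5 (List.mem_cons.mpr (hiff.mpr rfl))⟩
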